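-- pv_equiv track=rewrite | github.com/labdao/plex | tools/generator/utils.py | slash_to_convexity_notation
-- ===== SOURCE A (Python) =====
-- def slash_to_convexity_notation(sequence, slash_contig):
--
--     # Find the maximum index required
--     max_index = 0
--     parts = slash_contig.split('/')
--     for part in parts:
--         if ':' in part:
--             _, end = map(int, part[1:].split(':'))
--             max_index = max(max_index, end)
--         elif part:
--             max_index = max(max_index, int(part[1:]))
--
--     # Ensure permissibility_seed is long enough and initialize with '-'
--     permissibility_seed = ['-'] * max(max_index, len(sequence))
--
--     # Process each part of the slash_contig
--     for part in parts:
--         if part: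
--             type_char = part[0]
--             if ':' in part:
--                 start, end = map(int, part[1:].split(':'))
--             else:
--                 start = end = int(part[1:])
--
--             for i in range(start, end + 1):
--                 if type_char == 'B':
--                     permissibility_seed[i-1] = sequence[i-1] if i-1 < len(sequence) else '-'
--                 elif type_char == 'x':
--                     permissibility_seed[i-1] = 'X'
--                 elif type_char == '*':
--                     permissibility_seed[i-1] = '*'
--
--     # Join the list into a string and return
--     return ''.join(permissibility_seed)
-- ===== SOURCE B (Python) =====
-- def slash_to_convexity_notation(sequence, slash_contig):
--     # Parse the contig notation once into a table of (type_char, start, end) entries.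
--     table = []
--     for part in slash_contig.split('/'):
--         if not part:
--             continue
--         if ':' in part:
--             start, end = map(int, part[1:].split(':'))
--         else:
--             start = end = int(part[1:])
--         table.append((part[0], start, end))
--     size = max(max((e for _, _, e in table), default=0), len(sequence))
--     # Decide each output position from the last table entry covering it.
--     out = []
--     for pos in range(1, size + 1):
--         ch = '-'
--         for c, s, e in table:
--             if s <= pos <= e:
--                 if c == 'B':
--                     ch = sequence[pos - 1] if pos - 1 < len(sequence) else '-'
--                 elif c == 'x':
--                     ch = 'X'
--                 elif c == '*':
--                     ch = '*'
--         out.append(ch)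
--     return ''.join(out)
-- ===== Notes on version B (the rewrite author's own statement) =====
-- stated objective: alternative
-- what changed: B parses the contig string once into a (type, start, end) table and then constructs the output position by position, each character decided by the last table entry covering that position, instead of A's two re-parsing passes over the parts plus a mutable seed array filled by per-index range writes; Pre_ excludes parts that fail int() parsing or ':' unpacking (A raises ValueError) and typed parts whose nonempty range starts at an index below 1, outside the 1-based notation's domain, where A raises IndexError or writes through Python's negative indexing.
-- outside the precondition, e.g. on slash_to_convexity_notation('ab', 'x0:1'): A returns 'XX', B returns 'X-'; on slash_to_convexity_notation('ab', 'x-9:1'): A raises IndexError, B returns 'X-'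
import Mathlib
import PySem

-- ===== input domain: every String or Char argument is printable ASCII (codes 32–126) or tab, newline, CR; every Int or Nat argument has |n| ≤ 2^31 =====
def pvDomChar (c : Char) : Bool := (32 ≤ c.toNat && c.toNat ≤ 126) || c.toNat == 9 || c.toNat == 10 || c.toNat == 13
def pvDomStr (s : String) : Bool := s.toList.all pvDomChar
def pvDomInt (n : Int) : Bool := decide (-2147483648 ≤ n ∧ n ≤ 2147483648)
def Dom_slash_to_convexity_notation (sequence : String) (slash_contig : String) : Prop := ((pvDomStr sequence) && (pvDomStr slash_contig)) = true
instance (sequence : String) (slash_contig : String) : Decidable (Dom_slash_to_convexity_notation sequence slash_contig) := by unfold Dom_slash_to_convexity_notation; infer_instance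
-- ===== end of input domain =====

-- B parses the contig once into a (type, start, end) table and rebuilds the output position by
-- position (the last table entry covering a position decides its character) instead of A's two
-- re-parsing passes plus a mutable seed array filled by range writes; same return value on Pre_.

-- ===== PORT A =====

-- Shared parse of one '/'-part into its (start, end) range — both Python versions contain
-- exactly this code (':' form unpacking two ints, else a single int); none = Python raises.
def pvParseRange? (part : List Char) : Option (Int × Int) :=
  if PySem.Chars.isIn [':'] part then
    match PySem.Chars.splitOn (PySem.List.slice part (some 1) none) [':'] with
    | [a, b] =>
      match PySem.Int.ofChars? a, PySem.Int.ofChars? b with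
      | some s, some e => some (s, e)
      | _, _ => none
    | _ => none
  else
    match PySem.Int.ofChars? (PySem.List.slice part (some 1) none) with
    | some n => some (n, n)
    | none => none

-- A's first loop: the running maximum of the parsed end indices.
def pvAMax (parts : List (List Char)) : Option Int :=
  parts.foldlM (fun m part =>
    if PySem.Chars.isIn [':'] part then
      match pvParseRange? part with
      | some (_, e) => some (max m e)
      | none => none
    else if part ≠ [] then
      match PySem.Int.ofChars? (PySem.List.slice part (some 1) none) with
      | some n => some (max m n)
      | none => none
    else some m) 0

-- one iteration of A's inner `for i in range(start, end+1)` body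
def pvAWrite1 (seq : List Char) (c : Char) (seed : List Char) (i : Int) : Option (List Char) :=
  if c = 'B' then
    match (if i - 1 < (seq.length : Int) then PySem.List.pyGet? seq (i - 1) else some '-') with
    | some ch => PySem.List.pySet? seed (i - 1) ch
    | none => none
  else if c = 'x' then PySem.List.pySet? seed (i - 1) 'X'
  else if c = '*' then PySem.List.pySet? seed (i - 1) '*'
  else some seed

-- one iteration of A's second loop (`if part:` … parse … fill the range)
def pvAFillPart (seq : List Char) (seed : List Char) (part : List Char) : Option (List Char) :=
  if part = [] then some seed else
  match part.head?, pvParseRange? part with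
  | some c, some (s, e) => (PySem.List.pyRange s (e + 1)).foldlM (pvAWrite1 seq c) seed
  | _, _ => none

def slash_to_convexity_notation (sequence : String) (slash_contig : String) : String :=
  match pvAMax (PySem.Chars.splitOn slash_contig.toList ['/']) with
  | none => ""  -- Python raises (excluded by Pre_)
  | some maxIdx =>
    match (PySem.Chars.splitOn slash_contig.toList ['/']).foldlM (pvAFillPart sequence.toList)
        (List.replicate (max maxIdx (sequence.toList.length : Int)).toNat '-') with
    | none => ""  -- Python raises (excluded by Pre_)
    | some seed => String.ofList seed

-- ===== PORT B =====

-- B's single parse pass: the table of (type_char, start, end) entries.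
def pvBTable (parts : List (List Char)) : Option (List (Char × Int × Int)) :=
  parts.foldlM (fun tbl part =>
    if part = [] then some tbl else
    match part.head?, pvParseRange? part with
    | some c, some (s, e) => some (tbl ++ [(c, s, e)])
    | _, _ => none) []

-- Source B's inner loop body: if entry `ent` covers position pos, the character it writes; else ch.
def pvBCell (seq : List Char) (pos : Int) (ch : Char) (ent : Char × Int × Int) : Option Char :=
  if ent.2.1 ≤ pos ∧ pos ≤ ent.2.2 then
    if ent.1 = 'B' then
      if pos - 1 < (seq.length : Int) then PySem.List.pyGet? seq (pos - 1) else some '-'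
    else if ent.1 = 'x' then some 'X'
    else if ent.1 = '*' then some '*'
    else some ch
  else some ch

def slash_to_convexity_notation_alt (sequence : String) (slash_contig : String) : String :=
  match pvBTable (PySem.Chars.splitOn slash_contig.toList ['/']) with
  | none => ""  -- Python raises (excluded by Pre_)
  | some tbl =>
    let size : Int := max (PySem.List.maxD (tbl.map (fun t => t.2.2)) (fun x => x) 0) (sequence.toList.length : Int)
    match (PySem.List.pyRange 1 (size + 1)).foldlM (fun out pos =>
        match tbl.foldlM (fun ch ent => pvBCell sequence.toList pos ch ent) '-' with
        | some ch => some (out ++ [ch])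
        | none => none) ([] : List Char) with
    | some cs => String.ofList cs
    | none => ""  -- unreachable: pvBCell only reads in-range positions

-- ===== PRECONDITION & SPEC =====

-- a part parses under Python's int()/unpacking, and a typed part's nonempty range starts at
-- index 1 or later (the notation's 1-based domain)
def pvPartOk (part : List Char) : Bool :=
  if part = [] then true else
  match pvParseRange? part with
  | none => false
  | some (s, e) =>
    if part.head? = some 'B' ∨ part.head? = some 'x' ∨ part.head? = some '*' then
      decide (s ≤ e → 1 ≤ s)
    else true

-- Pre_ excludes parts that fail int() parsing or ':' unpacking (A raises ValueError) and typed
-- parts whose nonempty range starts at an index below 1 — outside the 1-based notation's domain —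
-- where A raises IndexError or writes through Python's negative indexing while B skips the
-- out-of-range positions.
def Pre_slash_to_convexity_notation (sequence : String) (slash_contig : String) : Prop :=
  (PySem.Chars.splitOn slash_contig.toList ['/']).all pvPartOk = true

instance (sequence : String) (slash_contig : String) : Decidable (Pre_slash_to_convexity_notation sequence slash_contig) := by
  unfold Pre_slash_to_convexity_notation; infer_instance

def pvWitness_slash_to_convexity_notation : String × String := ("ab", "B1:2/x4")

def Spec_slash_to_convexity_notation (sequence : String) (slash_contig : String) (out : String) : Prop := out = slash_to_convexity_notation_alt sequence slash_contig
instance (sequence : String) (slash_contig : String) (out : String) : Decidable (Spec_slash_to_convexity_notation sequence slash_contig out) := by unfold Spec_slash_to_convexity_notation; infer_instance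

-- ===== CLAIM (what is proved, stated in full; the proofs are below) =====
def Claim_equal_slash_to_convexity_notation : Prop := ∀ (sequence : String) (slash_contig : String), Dom_slash_to_convexity_notation sequence slash_contig → Pre_slash_to_convexity_notation sequence slash_contig → Spec_slash_to_convexity_notation sequence slash_contig (slash_to_convexity_notation sequence slash_contig)

-- ===== LEMMAS AND PROOFS =====

-- the character a typed entry writes at 1-based position i
def pvCharP (seq : List Char) (c : Char) (i : Int) : Char :=
  if c = 'B' then (if i - 1 < (seq.length : Int) then PySem.List.pyGetD seq (i - 1) '-' else '-')
  else if c = 'x' then 'X'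
  else if c = '*' then '*'
  else '-'

-- pure denotation of one cell decision at 0-based output position j
def pvCellP (seq : List Char) (j : Nat) (ch : Char) (ent : Char × Int × Int) : Char :=
  if ent.2.1 ≤ (j : Int) + 1 ∧ (j : Int) + 1 ≤ ent.2.2 then
    if ent.1 = 'B' ∨ ent.1 = 'x' ∨ ent.1 = '*' then pvCharP seq ent.1 ((j : Int) + 1) else ch
  else ch

-- the table of successfully parsed nonempty parts
def pvTable (parts : List (List Char)) : List (Char × Int × Int) :=
  parts.filterMap (fun part =>
    match part.head?, pvParseRange? part with
    | some c, some (s, e) => some (c, s, e)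
    | _, _ => none)

-- running maximum of parsed end indices (a failed parse contributes nothing)
def pvMaxStep (m : Int) (part : List Char) : Int :=
  match pvParseRange? part with
  | some (_, e) => max m e
  | none => m

-- ---------- generic indexing facts ----------

theorem pvGet?_eq_some_getD (xs : List Char) (i : Int) (d : Char)
    (h1 : -(xs.length : Int) ≤ i) (h2 : i < (xs.length : Int)) :
    PySem.List.pyGet? xs i = some (PySem.List.pyGetD xs i d) := by
  obtain ⟨v, hv⟩ : ∃ v, PySem.List.pyGet? xs i = some v := by
    unfold PySem.List.pyGet? PySem.List.pyIdx?
    split_ifs with h3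
    · exact ⟨xs[i.toNat]'(by omega), by
        simp [List.getElem?_eq_getElem (by omega : i.toNat < xs.length)]⟩
    · exact ⟨xs[xs.length - (-i).toNat]'(by omega), by
        simp [List.getElem?_eq_getElem (by omega : xs.length - (-i).toNat < xs.length)]⟩
  rw [hv]
  unfold PySem.List.pyGetD
  rw [hv]
  rfl

theorem pvGetD_set (xs : List Char) (p j : Nat) (hj : j < xs.length) (c d : Char) :
    (xs.set p c).getD j d = if p = j then c else xs.getD j d := by
  rcases eq_or_ne p j with rfl | h
  · simp [hj]
  · simp [hj, h]

theorem pvGetD_replicate (n j : Nat) (c : Char) : (List.replicate n c).getD j c = c := by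
  rcases Nat.lt_or_ge j n with h | h
  · rw [List.getD_eq_getElem _ _ (by simpa using h), List.getElem_replicate]
  · rw [List.getD_eq_default _ _ (by simpa using h)]

-- ---------- A's inner range loop computes pvCellP pointwise ----------

theorem pvWriteRange (seq : List Char) (L : Nat) (c : Char)
    (s e : Int) (seed : List Char) (hlen : seed.length = L) (hub : e ≤ (L : Int))
    (hs : (c = 'B' ∨ c = 'x' ∨ c = '*') → s ≤ e → 1 ≤ s) :
    ∃ seed', (PySem.List.pyRange s (e + 1)).foldlM (pvAWrite1 seq c) seed = some seed' ∧
      seed'.length = L ∧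
      ∀ j < L, seed'.getD j '-' = pvCellP seq j (seed.getD j '-') (c, s, e) := by
  by_cases hc : c = 'B' ∨ c = 'x' ∨ c = '*'
  case neg =>
    have hfold : ∀ (r : List Int), r.foldlM (pvAWrite1 seq c) seed = some seed := by
      intro r; induction r with
      | nil => rfl
      | cons a t ih =>
        have : pvAWrite1 seq c seed a = some seed := by
          unfold pvAWrite1
          split_ifs with h1 h2 h3 <;> simp_all
        simp [List.foldlM_cons, this, ih]
    refine ⟨seed, hfold _, hlen, ?_⟩
    intro j hj
    simp [pvCellP, hc]
  case pos =>
  by_cases hse : s ≤ e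
  · have key : ∀ (n : Nat) (s : Int) (seed : List Char), seed.length = L → 1 ≤ s → s ≤ e + 1 →
        (e + 1 - s).toNat = n →
        ∃ seed', (PySem.List.pyRange s (e + 1)).foldlM (pvAWrite1 seq c) seed = some seed' ∧
          seed'.length = L ∧
          ∀ j < L, seed'.getD j '-' = pvCellP seq j (seed.getD j '-') (c, s, e) := by
      intro n
      induction n with
      | zero =>
        intro s seed hlen hs1 hle hn
        have hr : PySem.List.pyRange s (e + 1) = [] := by
          simp [PySem.List.pyRange]; omega
        refine ⟨seed, by simp [hr], hlen, ?_⟩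
        intro j hj
        simp only [pvCellP]
        rw [if_neg (by omega)]
      | succ n ih =>
        intro s seed hlen hs1 hle hn
        have hsle : s ≤ e := by omega
        have hr : PySem.List.pyRange s (e + 1) = s :: PySem.List.pyRange (s + 1) (e + 1) :=
          PySem.List.pyRange_one_cons (by omega)
        set p : Nat := (s - 1).toNat with hp
        have hpI : (p : Int) = s - 1 := by rw [hp]; omega
        have hpL : p < L := by omega
        have hset : ∀ ch, PySem.List.pySet? seed (s - 1) ch = some (seed.set p ch) := by
          intro ch
          have hidx : PySem.List.pyIdx? seed.length (s - 1) = some p := by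
            unfold PySem.List.pyIdx?
            rw [hlen]
            rw [if_pos (by omega : (0:Int) ≤ s - 1), if_pos (by omega : s - 1 < (L : Int))]
          unfold PySem.List.pySet?
          rw [hidx, Option.map_some]
        have hwrite : pvAWrite1 seq c seed s = some (seed.set p (pvCharP seq c s)) := by
          unfold pvAWrite1 pvCharP
          rcases hc with h | h | h
          · subst h
            simp only [if_neg (by decide : ¬ ('B' = 'x')),
              if_neg (by decide : ¬ ('B' = '*'))]
            by_cases hr2 : s - 1 < (seq.length : Int)
            · rw [if_pos hr2, pvGet?_eq_some_getD seq (s-1) '-' (by omega) hr2]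
              simp [hset, hr2]
            · rw [if_neg hr2, if_neg hr2]
              simp [hset]
          · subst h; simp [hset]
          · subst h; simp [hset]
        obtain ⟨seed', h1, h2, h3⟩ := ih (s + 1) (seed.set p (pvCharP seq c s))
          (by simp [hlen]) (by omega) (by omega) (by omega)
        refine ⟨seed', ?_, h2, ?_⟩
        · rw [hr]
          simp only [List.foldlM_cons, hwrite]
          exact h1
        · intro j hj
          rw [h3 j hj]
          have hjlen : j < seed.length := by omega
          have hgset := pvGetD_set seed p j hjlen (pvCharP seq c s) '-'
          simp only [pvCellP, hgset]
          by_cases hd1 : s + 1 ≤ (j : Int) + 1 ∧ (j : Int) + 1 ≤ e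
          · rw [if_pos hd1, if_pos (by omega : s ≤ (j : Int) + 1 ∧ (j : Int) + 1 ≤ e),
              if_pos hc, if_pos hc]
          · rw [if_neg hd1]
            by_cases hd0 : s ≤ (j : Int) + 1 ∧ (j : Int) + 1 ≤ e
            · have hjs : (j : Int) + 1 = s := by omega
              rw [if_pos hd0, if_pos (by omega : p = j), if_pos hc, hjs]
            · rw [if_neg hd0, if_neg (by omega : ¬ p = j)]
    exact key (e + 1 - s).toNat s seed hlen (hs hc hse) (by omega) rfl
  · have hr : PySem.List.pyRange s (e + 1) = [] := by
      simp [PySem.List.pyRange]; omega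
    refine ⟨seed, by simp [hr], hlen, ?_⟩
    intro j hj
    simp only [pvCellP]
    rw [if_neg (by omega)]

-- ---------- parsing: both passes of A and B's single pass agree ----------

theorem pvParseRange?_nil : pvParseRange? [] = none := by decide

theorem pvIsIn_ne_nil (part : List Char) (h : PySem.Chars.isIn [':'] part = true) : part ≠ [] := by
  intro hnil; subst hnil; revert h; decide

theorem pvAMax_eq (parts : List (List Char))
    (hok : ∀ part ∈ parts, part ≠ [] → (pvParseRange? part).isSome) :
    pvAMax parts = some (parts.foldl pvMaxStep 0) := by
  suffices h : ∀ (m : Int), parts.foldlM (fun m part =>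
      if PySem.Chars.isIn [':'] part then
        match pvParseRange? part with
        | some (_, e) => some (max m e)
        | none => none
      else if part ≠ [] then
        match PySem.Int.ofChars? (PySem.List.slice part (some 1) none) with
        | some n => some (max m n)
        | none => none
      else some m) m = some (parts.foldl pvMaxStep m) by
    exact h 0
  induction parts with
  | nil => intro m; rfl
  | cons part rest ih =>
    intro m
    have hokh := hok part (by simp)
    have hokr : ∀ p ∈ rest, p ≠ [] → (pvParseRange? p).isSome := fun p hp => hok p (by simp [hp])
    simp only [List.foldlM_cons, List.foldl_cons]
    by_cases hcol : PySem.Chars.isIn [':'] part = true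
    · have hne := pvIsIn_ne_nil part hcol
      obtain ⟨⟨ps, pe⟩, hpr⟩ := Option.isSome_iff_exists.mp (hokh hne)
      rw [if_pos hcol, hpr]
      simp only [Option.bind_eq_bind, Option.bind_some, pvMaxStep, hpr]
      exact ih hokr _
    · by_cases hne : part = []
      · subst hne
        simp only [if_neg hcol, ne_eq, not_true_eq_false, if_false, Option.bind_eq_bind,
          Option.bind_some, pvMaxStep, pvParseRange?_nil]
        exact ih hokr _
      · obtain ⟨⟨ps, pe⟩, hpr⟩ := Option.isSome_iff_exists.mp (hokh hne)
        have hpr' := hpr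
        unfold pvParseRange? at hpr'
        rw [if_neg hcol] at hpr'
        rw [if_neg hcol, if_pos (by simpa using hne)]
        cases hof : PySem.Int.ofChars? (PySem.List.slice part (some 1) none) with
        | none => rw [hof] at hpr'; exact absurd hpr' (by simp)
        | some n =>
          rw [hof] at hpr'
          have hse : ps = n ∧ pe = n := by
            simp only [Option.some.injEq, Prod.mk.injEq] at hpr'
            exact ⟨hpr'.1.symm, hpr'.2.symm⟩
          simp only [Option.bind_eq_bind, Option.bind_some, pvMaxStep, hpr, hse.2]
          exact ih hokr _

theorem pvBTable_eq (parts : List (List Char))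
    (hok : ∀ part ∈ parts, part ≠ [] → (pvParseRange? part).isSome) :
    pvBTable parts = some (pvTable parts) := by
  suffices h : ∀ (acc : List (Char × Int × Int)), parts.foldlM (fun tbl part =>
      if part = [] then some tbl else
      match part.head?, pvParseRange? part with
      | some c, some (s, e) => some (tbl ++ [(c, s, e)])
      | _, _ => none) acc = some (acc ++ pvTable parts) by
    simpa using h []
  induction parts with
  | nil => intro acc; simp [pvTable]
  | cons part rest ih =>
    intro acc
    have hokr : ∀ p ∈ rest, p ≠ [] → (pvParseRange? p).isSome := fun p hp => hok p (by simp [hp])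
    simp only [List.foldlM_cons]
    by_cases hne : part = []
    · subst hne
      simp only [Option.bind_eq_bind, pvTable, List.filterMap_cons]
      exact ih hokr _
    · obtain ⟨c, t, rfl⟩ : ∃ c t, part = c :: t := by
        cases part with
        | nil => exact absurd rfl hne
        | cons c t => exact ⟨c, t, rfl⟩
      obtain ⟨⟨ps, pe⟩, hpr⟩ := Option.isSome_iff_exists.mp (hok _ (by simp) hne)
      rw [if_neg hne]
      simp only [List.head?_cons, hpr, Option.bind_eq_bind, Option.bind_some,
        pvTable, List.filterMap_cons]
      rw [ih hokr]
      simp [pvTable]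

-- ---------- the maximum end index, three ways ----------

theorem pvMaxStep_mono (m : Int) (part : List Char) : m ≤ pvMaxStep m part := by
  unfold pvMaxStep
  cases pvParseRange? part with
  | none => exact le_refl m
  | some r => exact le_max_left _ _

theorem pvFoldMax_le (parts : List (List Char)) (m : Int) : m ≤ parts.foldl pvMaxStep m := by
  induction parts generalizing m with
  | nil => exact le_refl m
  | cons part rest ih => exact le_trans (pvMaxStep_mono m part) (ih _)

theorem pvMaxVal_bound (parts : List (List Char)) (m : Int) :
    ∀ part ∈ parts, ∀ s e, pvParseRange? part = some (s, e) → e ≤ parts.foldl pvMaxStep m := by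
  induction parts generalizing m with
  | nil => intro part h; simp at h
  | cons q rest ih =>
    intro part hmem s e hpr
    rcases List.mem_cons.mp hmem with rfl | hmem'
    · refine le_trans ?_ (pvFoldMax_le rest (pvMaxStep m part))
      unfold pvMaxStep
      rw [hpr]
      exact le_max_right _ _
    · exact ih _ part hmem' s e hpr

theorem pvFold_eq_table (parts : List (List Char)) (m : Int) :
    parts.foldl pvMaxStep m = ((pvTable parts).map (fun t => t.2.2)).foldl max m := by
  induction parts generalizing m with
  | nil => rfl
  | cons part rest ih =>
    simp only [List.foldl_cons, pvTable, List.filterMap_cons]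
    cases part with
    | nil =>
      simp only [List.head?_nil]
      rw [show pvMaxStep m [] = m by unfold pvMaxStep; rw [pvParseRange?_nil]]
      exact ih m
    | cons c t =>
      simp only [List.head?_cons]
      cases hpr : pvParseRange? (c :: t) with
      | none =>
        rw [show pvMaxStep m (c :: t) = m by unfold pvMaxStep; rw [hpr]]
        exact ih m
      | some r =>
        rw [show pvMaxStep m (c :: t) = max m r.2 by unfold pvMaxStep; rw [hpr]]
        simpa [pvTable] using ih (max m r.2)

theorem pvFoldlMax_max (t : List Int) (a b : Int) :
    t.foldl max (max a b) = max a (t.foldl max b) := by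
  induction t generalizing b with
  | nil => simp
  | cons x t ih => simp [List.foldl_cons, max_assoc, ih]

theorem pvMaxD_max (xs : List Int) (n : Int) (hn : 0 ≤ n) :
    max (PySem.List.maxD xs (fun x => x) 0) n = max (xs.foldl max 0) n := by
  cases xs with
  | nil => rfl
  | cons x t =>
    rw [PySem.List.maxD_id_cons x t 0, List.foldl_cons, pvFoldlMax_max t 0 x]
    omega

-- ---------- B's loops compute pvCellP pointwise ----------

theorem pvBInner (seq : List Char) (tbl : List (Char × Int × Int)) (j : Nat) (ch0 : Char) :
    tbl.foldlM (fun ch ent => pvBCell seq ((j : Int) + 1) ch ent) ch0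
      = some (tbl.foldl (pvCellP seq j) ch0) := by
  induction tbl generalizing ch0 with
  | nil => rfl
  | cons ent rest ih =>
    have hstep : pvBCell seq ((j : Int) + 1) ch0 ent = some (pvCellP seq j ch0 ent) := by
      have hget : ∀ (i : Int), 0 ≤ i → i < (seq.length : Int) →
          PySem.List.pyGet? seq i = some (PySem.List.pyGetD seq i '-') :=
        fun i hi1 hi2 => pvGet?_eq_some_getD seq i '-' (by omega) hi2
      obtain ⟨c, s, e⟩ := ent
      unfold pvBCell pvCellP pvCharP
      simp only [show ((j : Int) + 1 - 1) = (j : Int) from by omega]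
      by_cases hd : s ≤ (j : Int) + 1 ∧ (j : Int) + 1 ≤ e
      · simp only [if_pos hd]
        by_cases h1 : c = 'B'
        · subst h1
          by_cases h2 : (j : Int) < (seq.length : Int)
          · simp [h2,
              List.getElem?_eq_getElem (show j < seq.length by exact_mod_cast h2)]
          · simp [h2]
        · by_cases h2 : c = 'x'
          · subst h2; simp
          · by_cases h3 : c = '*'
            · subst h3; simp
            · simp [h1, h2, h3]
      · simp only [if_neg hd]
    simp only [List.foldlM_cons, hstep, Option.bind_eq_bind, Option.bind_some, List.foldl_cons]
    exact ih _

theorem pvRange_shift (L : Nat) :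
    PySem.List.pyRange 1 ((L : Int) + 1) = List.map (fun j : Nat => (j : Int) + 1) (List.range L) := by
  induction L with
  | zero => decide
  | succ n ih =>
    have h : ((n + 1 : Nat) : Int) + 1 = ((n : Int) + 1) + 1 := by push_cast; ring
    rw [h, PySem.List.pyRange_one_succ_right (by omega), ih, List.range_succ, List.map_append]
    simp

theorem pvBOuter (seq : List Char) (L : Nat) (tbl : List (Char × Int × Int)) :
    (PySem.List.pyRange 1 ((L : Int) + 1)).foldlM (fun out pos =>
        match tbl.foldlM (fun ch ent => pvBCell seq pos ch ent) '-' with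
        | some ch => some (out ++ [ch])
        | none => none) ([] : List Char)
      = some ((List.range L).map (fun j => tbl.foldl (pvCellP seq j) '-')) := by
  rw [pvRange_shift]
  suffices h : ∀ (ks : List Nat) (acc : List Char),
      (List.map (fun j : Nat => (j : Int) + 1) ks).foldlM (fun out pos =>
        match tbl.foldlM (fun ch ent => pvBCell seq pos ch ent) '-' with
        | some ch => some (out ++ [ch])
        | none => none) acc
      = some (acc ++ ks.map (fun j => tbl.foldl (pvCellP seq j) '-')) by
    simpa using h (List.range L) []
  intro ks
  induction ks with
  | nil => intro acc; simp
  | cons k t ih =>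
    intro acc
    simp only [List.map_cons, List.foldlM_cons, pvBInner seq tbl k '-',
      Option.bind_eq_bind, Option.bind_some]
    rw [ih (acc ++ [tbl.foldl (pvCellP seq k) '-'])]
    simp

-- ---------- unpacking Pre_ for one part ----------

theorem pvPartOk_parse (part : List Char)
    (h : pvPartOk part = true) (hne : part ≠ []) : (pvParseRange? part).isSome := by
  unfold pvPartOk at h
  rw [if_neg hne] at h
  cases hpr : pvParseRange? part with
  | none => rw [hpr] at h; exact absurd h (by simp)
  | some r => simp

-- ---------- A's part loop computes the table fold pointwise ----------

theorem pvFillAll (seq : List Char) (L : Nat) (parts : List (List Char))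
    (hok : ∀ part ∈ parts, pvPartOk part = true)
    (hub : ∀ part ∈ parts, ∀ s e, pvParseRange? part = some (s, e) → e ≤ (L : Int))
    (seed : List Char) (hlen : seed.length = L) :
    ∃ seed', parts.foldlM (pvAFillPart seq) seed = some seed' ∧ seed'.length = L ∧
      ∀ j < L, seed'.getD j '-' = (pvTable parts).foldl (pvCellP seq j) (seed.getD j '-') := by
  induction parts generalizing seed with
  | nil => exact ⟨seed, rfl, hlen, by intro j hj; simp [pvTable]⟩
  | cons part rest ih =>
    have hokh := hok part (by simp)
    have hokr : ∀ p ∈ rest, pvPartOk p = true := fun p hp => hok p (by simp [hp])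
    have hubr : ∀ p ∈ rest, ∀ s e, pvParseRange? p = some (s, e) → e ≤ (L : Int) :=
      fun p hp => hub p (by simp [hp])
    by_cases hne : part = []
    · subst hne
      obtain ⟨seed', h1, h2, h3⟩ := ih hokr hubr seed hlen
      refine ⟨seed', ?_, h2, ?_⟩
      · simp only [List.foldlM_cons, pvAFillPart, Option.bind_eq_bind]
        exact h1
      · intro j hj
        rw [h3 j hj]
        simp [pvTable]
    · obtain ⟨c, t, rfl⟩ : ∃ c t, part = c :: t := by
        cases part with
        | nil => exact absurd rfl hne
        | cons c t => exact ⟨c, t, rfl⟩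
      obtain ⟨⟨s, e⟩, hpr⟩ := Option.isSome_iff_exists.mp (pvPartOk_parse _ hokh hne)
      have hsbound : (c = 'B' ∨ c = 'x' ∨ c = '*') → s ≤ e → 1 ≤ s := by
        intro hc hse
        unfold pvPartOk at hokh
        rw [if_neg hne] at hokh
        simp only [hpr] at hokh
        have hhd : (c :: t).head? = some 'B' ∨ (c :: t).head? = some 'x' ∨
            (c :: t).head? = some '*' := by
          rw [List.head?_cons]
          rcases hc with h | h | h <;> simp [h]
        rw [if_pos hhd] at hokh
        have := of_decide_eq_true hokh
        exact this hse
      obtain ⟨seed1, hw1, hlen1, hpt1⟩ :=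
        pvWriteRange seq L c s e seed hlen (hub _ (by simp) s e hpr) hsbound
      obtain ⟨seed', h1, h2, h3⟩ := ih hokr hubr seed1 hlen1
      refine ⟨seed', ?_, h2, ?_⟩
      · simp only [List.foldlM_cons, pvAFillPart, if_neg hne, List.head?_cons, hpr, hw1,
          Option.bind_eq_bind, Option.bind_some]
        exact h1
      · intro j hj
        rw [h3 j hj, hpt1 j hj]
        simp [pvTable, hpr]

-- ===== VERDICT (by name: the statement is the Claim_ definition above) =====
theorem slash_to_convexity_notation_spec : Claim_equal_slash_to_convexity_notation := by
  intro sequence slash_contig _ hpre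
  unfold Spec_slash_to_convexity_notation
  unfold Pre_slash_to_convexity_notation at hpre
  set seq := sequence.toList with hseqdef
  set parts := PySem.Chars.splitOn slash_contig.toList ['/'] with hpartsdef
  have hok : ∀ part ∈ parts, pvPartOk part = true := by
    intro part hmem
    exact List.all_eq_true.mp hpre part hmem
  have hparse : ∀ part ∈ parts, part ≠ [] → (pvParseRange? part).isSome :=
    fun part hm hne => pvPartOk_parse part (hok part hm) hne
  set M := parts.foldl pvMaxStep 0 with hMdef
  have hM0 : 0 ≤ M := pvFoldMax_le parts 0
  set L : Nat := (max M (seq.length : Int)).toNat with hLdef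
  have hLI : (L : Int) = max M (seq.length : Int) := by
    rw [hLdef]; omega
  have hub : ∀ part ∈ parts, ∀ s e, pvParseRange? part = some (s, e) → e ≤ (L : Int) := by
    intro part hm s e hpr
    have := pvMaxVal_bound parts 0 part hm s e hpr
    omega
  obtain ⟨seedA, hA1, hA2, hA3⟩ := pvFillAll seq L parts hok hub
    (List.replicate (max M (seq.length : Int)).toNat '-') (by rw [List.length_replicate, ← hLdef])
  have hseedA : seedA = (List.range L).map (fun j => (pvTable parts).foldl (pvCellP seq j) '-') := by
    apply List.ext_getElem (by simp [hA2])
    intro j h1 h2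
    have hj : j < L := by rw [hA2] at h1; exact h1
    have := hA3 j hj
    rw [pvGetD_replicate, List.getD_eq_getElem _ _ h1] at this
    rw [this]
    simp
  have hAeq : slash_to_convexity_notation sequence slash_contig
      = String.ofList ((List.range L).map (fun j => (pvTable parts).foldl (pvCellP seq j) '-')) := by
    unfold slash_to_convexity_notation
    rw [← hpartsdef, ← hseqdef] at *
    rw [pvAMax_eq parts hparse, ← hMdef]
    show (match parts.foldlM (pvAFillPart seq) (List.replicate (max M (seq.length : Int)).toNat '-') with
      | none => ""
      | some seed => String.ofList seed) = _
    rw [hA1, hseedA]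
  have hsize : max (PySem.List.maxD ((pvTable parts).map (fun t => t.2.2)) (fun x => x) 0)
      (seq.length : Int) = (L : Int) := by
    rw [pvMaxD_max _ _ (by omega), ← pvFold_eq_table parts 0, ← hMdef]
    omega
  have hBeq : slash_to_convexity_notation_alt sequence slash_contig
      = String.ofList ((List.range L).map (fun j => (pvTable parts).foldl (pvCellP seq j) '-')) := by
    unfold slash_to_convexity_notation_alt
    rw [← hpartsdef, ← hseqdef] at *
    rw [pvBTable_eq parts hparse]
    show (match (PySem.List.pyRange 1 (max (PySem.List.maxD ((pvTable parts).map (fun t => t.2.2)) (fun x => x) 0) (seq.length : Int) + 1)).foldlM (fun out pos =>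
        match (pvTable parts).foldlM (fun ch ent => pvBCell seq pos ch ent) '-' with
        | some ch => some (out ++ [ch])
        | none => none) ([] : List Char) with
      | some cs => String.ofList cs
      | none => "") = _
    rw [hsize, pvBOuter seq L (pvTable parts)]
  rw [hAeq, hBeq]
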